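-- pv_equiv track=rewrite | github.com/NicolaeTudor/LFA | Tema 1/main.py | find_word_generating_states
-- ===== SOURCE A (Python) =====
-- import queue
--
-- def find_word_generating_states(reverseTransitionStates, finalStates, statesNumber):
--     wordGeneratingStates = [False]*statesNumber
--     q = queue.Queue(maxsize=0)
--     for finalState in finalStates:
--         q.put(finalState)
--         wordGeneratingStates[finalState] = True
--
--     while not q.empty():
--         currentState = q.get()
--         for state in reverseTransitionStates[currentState]:
--             if wordGeneratingStates[state] is False:
--                 q.put(state)
--                 wordGeneratingStates[state] = True
--
--     return wordGeneratingStates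
-- ===== SOURCE B (Python) =====
-- def find_word_generating_states(reverseTransitionStates, finalStates, statesNumber):
--     # Queueless fixed-point iteration: sweep all marked states until a full
--     # pass marks nothing new.
--     mask = [False] * statesNumber
--     for finalState in finalStates:
--         mask[finalState] = True
--     changed = True
--     while changed:
--         changed = False
--         for currentState in range(statesNumber):
--             if mask[currentState]:
--                 for state in reverseTransitionStates[currentState]:
--                     if not mask[state]:
--                         mask[state] = True
--                         changed = True
--     return mask
-- ===== Notes on version B (the rewrite author's own statement) =====
-- stated objective: alternative
-- what changed: the queue-driven BFS is replaced by a queueless fixed-point iteration that repeatedly sweeps every marked state and relaxes its predecessors until a full pass with a changed flag marks nothing new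
-- outside the precondition, e.g. on find_word_generating_states([[]], [-1], 1): A returns [True], B returns [True]; on find_word_generating_states([[], [7]], [0], 2): A returns [True, False], B returns [True, False]; on find_word_generating_states([[1, -1], [0, -1]], [-1, -1], 1): A returns [True], B raises IndexError
import Mathlib
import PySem

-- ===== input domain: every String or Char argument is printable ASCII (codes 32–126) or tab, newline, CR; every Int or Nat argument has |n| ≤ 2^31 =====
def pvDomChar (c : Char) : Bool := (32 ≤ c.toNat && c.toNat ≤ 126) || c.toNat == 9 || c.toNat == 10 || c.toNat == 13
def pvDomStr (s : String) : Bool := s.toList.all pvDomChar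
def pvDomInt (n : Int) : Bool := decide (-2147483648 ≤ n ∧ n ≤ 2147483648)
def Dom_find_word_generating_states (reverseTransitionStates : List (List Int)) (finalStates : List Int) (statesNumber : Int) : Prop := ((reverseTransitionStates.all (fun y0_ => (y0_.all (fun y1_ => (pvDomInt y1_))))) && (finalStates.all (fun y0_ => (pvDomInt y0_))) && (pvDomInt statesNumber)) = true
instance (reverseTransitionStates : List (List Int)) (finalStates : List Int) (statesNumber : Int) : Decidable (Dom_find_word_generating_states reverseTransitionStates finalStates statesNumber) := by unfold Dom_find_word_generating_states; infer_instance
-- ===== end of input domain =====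

-- B replaces the queue-driven BFS by a queueless fixed-point iteration (alternative decomposition, not faster).

-- ===== PORT A =====
-- Mask reads/writes and row lookups, exact for indices 0 ≤ i < length — which Pre_ guarantees
-- for every index either program ever uses; out of that range a read yields true and a write
-- is a no-op (Python would raise or wrap there; such inputs are outside Pre_).
def pvMget (mask : List Bool) (i : Int) : Bool :=
  if 0 ≤ i then mask.getD i.toNat true else true

def pvMset (mask : List Bool) (i : Int) : List Bool :=
  if 0 ≤ i then mask.set i.toNat true else mask

def pvRow (rev : List (List Int)) (c : Int) : List Int :=
  if 0 ≤ c then rev.getD c.toNat [] else []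

-- loop body of A's inner 'for state in reverseTransitionStates[currentState]'
def pvStepA (acc : List Int × List Bool) (s : Int) : List Int × List Bool :=
  if pvMget acc.2 s = false then (acc.1 ++ [s], pvMset acc.2 s) else acc

-- termination helpers (cited by decreasing_by)
lemma pvMget_false {mask : List Bool} {s : Int} (h : pvMget mask s = false) :
    0 ≤ s ∧ s.toNat < mask.length ∧ mask.getD s.toNat true = false := by
  unfold pvMget at h
  split at h
  · refine ⟨by assumption, ?_, h⟩
    by_contra hlen
    rw [List.getD_eq_getElem?_getD, List.getElem?_eq_none (by omega)] at h
    simp at h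
  · simp at h

lemma pvMset_count (mask : List Bool) (s : Int) (h : pvMget mask s = false) :
    (pvMset mask s).count false + 1 = mask.count false := by
  obtain ⟨h0, hlt, hv⟩ := pvMget_false h
  rw [List.getD_eq_getElem?_getD, List.getElem?_eq_getElem hlt] at hv
  simp only [Option.getD_some] at hv
  unfold pvMset
  rw [if_pos h0, List.count_set hlt]
  have hc : 0 < mask.count false := List.count_pos_iff.2 (hv ▸ List.getElem_mem hlt)
  simp [hv]
  omega

lemma pvFoldA_measure (row : List Int) : ∀ (q : List Int) (mask : List Bool),
    (row.foldl pvStepA (q, mask)).2.count false + (row.foldl pvStepA (q, mask)).1.length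
      ≤ mask.count false + q.length := by
  induction row with
  | nil => intro q mask; simp
  | cons s row ih =>
    intro q mask
    simp only [List.foldl_cons]
    by_cases h : pvMget mask s = false
    · have hst : pvStepA (q, mask) s = (q ++ [s], pvMset mask s) := by simp [pvStepA, h]
      rw [hst]
      have := pvMset_count mask s h
      have h2 := ih (q ++ [s]) (pvMset mask s)
      simp only [List.length_append, List.length_cons, List.length_nil] at *
      omega
    · have hst : pvStepA (q, mask) s = (q, mask) := by simp [pvStepA, h]
      rw [hst]
      have := ih q mask
      omega

-- A's BFS loop: 'while not q.empty(): …'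
def pvBfsA (rev : List (List Int)) : List Int → List Bool → List Bool
  | [], mask => mask
  | c :: q, mask =>
      let p := (pvRow rev c).foldl pvStepA (q, mask)
      pvBfsA rev p.1 p.2
termination_by q mask => mask.count false + q.length
decreasing_by
  have hmeas := pvFoldA_measure (pvRow rev c) q mask
  simp only [List.length_cons]
  omega

def find_word_generating_states (reverseTransitionStates : List (List Int)) (finalStates : List Int) (statesNumber : Int) : List Bool :=
  let init := finalStates.foldl (fun (acc : List Int × List Bool) f => (acc.1 ++ [f], pvMset acc.2 f))
                ([], List.replicate statesNumber.toNat false)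
  pvBfsA reverseTransitionStates init.1 init.2

-- ===== PORT B =====
-- loop body of B's inner 'for state in reverseTransitionStates[currentState]'
def pvStepB (acc : List Bool × Bool) (s : Int) : List Bool × Bool :=
  if pvMget acc.1 s = false then (pvMset acc.1 s, true) else acc

-- loop body of B's 'for currentState in range(statesNumber)'
def pvStepOut (rev : List (List Int)) (acc : List Bool × Bool) (cur : Int) : List Bool × Bool :=
  if pvMget acc.1 cur = true then (pvRow rev cur).foldl pvStepB acc else acc

-- one full sweep of B's while-body (changed reset to False, then the for-loop)
def pvSweep (rev : List (List Int)) (n : Int) (mask : List Bool) : List Bool × Bool :=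
  (PySem.List.pyRange 0 n 1).foldl (pvStepOut rev) (mask, false)

-- termination helpers (cited by decreasing_by)
lemma pvFoldB_count (row : List Int) : ∀ (acc : List Bool × Bool) (m0 : Nat),
    acc.1.count false ≤ m0 → (acc.2 = true → acc.1.count false < m0) →
    (row.foldl pvStepB acc).1.count false ≤ m0 ∧
    ((row.foldl pvStepB acc).2 = true → (row.foldl pvStepB acc).1.count false < m0) := by
  induction row with
  | nil => intro acc m0 h1 h2; exact ⟨h1, h2⟩
  | cons s row ih =>
    intro acc m0 h1 h2
    simp only [List.foldl_cons]
    by_cases h : pvMget acc.1 s = false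
    · have hst : pvStepB acc s = (pvMset acc.1 s, true) := by simp [pvStepB, h]
      rw [hst]
      have := pvMset_count acc.1 s h
      exact ih _ m0 (by dsimp only; omega) (fun _ => by dsimp only; omega)
    · have hst : pvStepB acc s = acc := by simp [pvStepB, h]
      rw [hst]; exact ih acc m0 h1 h2

lemma pvFoldOut_count (rev : List (List Int)) (l : List Int) : ∀ (acc : List Bool × Bool) (m0 : Nat),
    acc.1.count false ≤ m0 → (acc.2 = true → acc.1.count false < m0) →
    (l.foldl (pvStepOut rev) acc).1.count false ≤ m0 ∧
    ((l.foldl (pvStepOut rev) acc).2 = true → (l.foldl (pvStepOut rev) acc).1.count false < m0) := by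
  induction l with
  | nil => intro acc m0 h1 h2; exact ⟨h1, h2⟩
  | cons c l ih =>
    intro acc m0 h1 h2
    simp only [List.foldl_cons]
    by_cases h : pvMget acc.1 c = true
    · have hst : pvStepOut rev acc c = (pvRow rev c).foldl pvStepB acc := by simp [pvStepOut, h]
      rw [hst]
      obtain ⟨g1, g2⟩ := pvFoldB_count (pvRow rev c) acc m0 h1 h2
      exact ih _ m0 g1 g2
    · have hst : pvStepOut rev acc c = acc := by simp [pvStepOut, h]
      rw [hst]; exact ih acc m0 h1 h2

lemma pvSweep_progress (rev : List (List Int)) (n : Int) (mask : List Bool)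
    (h : (pvSweep rev n mask).2 = true) :
    (pvSweep rev n mask).1.count false < mask.count false := by
  have := pvFoldOut_count rev (PySem.List.pyRange 0 n 1) (mask, false) (mask.count false)
    (le_refl _) (by simp)
  exact this.2 h

-- B's 'while changed:' loop
def pvLoopB (rev : List (List Int)) (n : Int) (mask : List Bool) : List Bool :=
  let p := pvSweep rev n mask
  if h : p.2 = true then pvLoopB rev n p.1 else p.1
termination_by mask.count false
decreasing_by
  exact pvSweep_progress rev n mask h

def find_word_generating_states_alt (reverseTransitionStates : List (List Int)) (finalStates : List Int) (statesNumber : Int) : List Bool :=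
  pvLoopB reverseTransitionStates statesNumber
    (finalStates.foldl (fun m f => pvMset m f) (List.replicate statesNumber.toNat false))

-- ===== PRECONDITION & SPEC =====
-- Pre_ restricts to the natural automaton encoding (no final state: anything goes, the loop
-- never runs; otherwise statesNumber ≥ 0, a predecessor list for each of the statesNumber
-- states, and every used state id in [0, statesNumber)); outside it Python A raises IndexError
-- or relies on accidental negative-index wraparound / negative list multiplication (where B may
-- itself raise or return the same value, see the cited examples).
def Pre_find_word_generating_states (reverseTransitionStates : List (List Int)) (finalStates : List Int) (statesNumber : Int) : Prop :=
  finalStates = [] ∨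
  (0 ≤ statesNumber ∧
   statesNumber.toNat ≤ reverseTransitionStates.length ∧
   (∀ f ∈ finalStates, 0 ≤ f ∧ f < statesNumber) ∧
   (∀ row ∈ reverseTransitionStates.take statesNumber.toNat, ∀ s ∈ row, 0 ≤ s ∧ s < statesNumber))

instance (reverseTransitionStates : List (List Int)) (finalStates : List Int) (statesNumber : Int) : Decidable (Pre_find_word_generating_states reverseTransitionStates finalStates statesNumber) := by
  unfold Pre_find_word_generating_states; infer_instance

def pvWitness_find_word_generating_states : List (List Int) × List Int × Int := ([[1], [0]], [0], 2)

def Spec_find_word_generating_states (reverseTransitionStates : List (List Int)) (finalStates : List Int) (statesNumber : Int) (out : List Bool) : Prop := out = find_word_generating_states_alt reverseTransitionStates finalStates statesNumber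
instance (reverseTransitionStates : List (List Int)) (finalStates : List Int) (statesNumber : Int) (out : List Bool) : Decidable (Spec_find_word_generating_states reverseTransitionStates finalStates statesNumber out) := by unfold Spec_find_word_generating_states; infer_instance

-- ===== CLAIM (what is proved, stated in full; the proofs are below) =====
def Claim_equal_find_word_generating_states : Prop := ∀ (reverseTransitionStates : List (List Int)) (finalStates : List Int) (statesNumber : Int), Dom_find_word_generating_states reverseTransitionStates finalStates statesNumber → Pre_find_word_generating_states reverseTransitionStates finalStates statesNumber → Spec_find_word_generating_states reverseTransitionStates finalStates statesNumber (find_word_generating_states reverseTransitionStates finalStates statesNumber)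

-- ===== LEMMAS AND PROOFS =====

-- states that can reach a final state through the reversed transitions
inductive pvGen (rev : List (List Int)) (finals : List Int) : Int → Prop
  | final {s : Int} : s ∈ finals → pvGen rev finals s
  | step {c s : Int} : pvGen rev finals c → s ∈ pvRow rev c → pvGen rev finals s


-- ----- basic mask lemmas -----
lemma getD_set_true (m : List Bool) (k t : Nat) (h : m.getD t true = true) :
    (m.set k true).getD t true = true := by
  rw [List.getD_eq_getElem?_getD, List.getElem?_set]
  split
  · split <;> simp
  · rw [← List.getD_eq_getElem?_getD]; exact h

lemma pvMget_mset_mono {m : List Bool} {j : Int} (i : Int) (h : pvMget m j = true) :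
    pvMget (pvMset m i) j = true := by
  unfold pvMget pvMset at *
  by_cases hj : 0 ≤ j
  · rw [if_pos hj] at h ⊢
    by_cases hi : 0 ≤ i
    · rw [if_pos hi]; exact getD_set_true m i.toNat j.toNat h
    · rw [if_neg hi]; exact h
  · rw [if_neg hj]

lemma pvMget_mset_self (m : List Bool) (i : Int) : pvMget (pvMset m i) i = true := by
  unfold pvMget pvMset
  by_cases hi : 0 ≤ i
  · rw [if_pos hi, if_pos hi]
    rcases Nat.lt_or_ge i.toNat m.length with hlt | hge
    · simp [List.getD_eq_getElem?_getD, hlt]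
    · simp [List.getD_eq_getElem?_getD,
        List.getElem?_eq_none (show (m.set i.toNat true).length ≤ i.toNat by simpa using hge)]
  · rw [if_neg hi]

lemma getD_pvMset_src {m : List Bool} {i : Int} {j : Nat}
    (h : (pvMset m i).getD j false = true) : m.getD j false = true ∨ i = (j : Int) := by
  unfold pvMset at h
  split at h
  · rw [List.getD_eq_getElem?_getD, List.getElem?_set] at h
    by_cases he : i.toNat = j
    · right; omega
    · left
      rw [if_neg he, ← List.getD_eq_getElem?_getD] at h
      exact h
  · exact Or.inl h

lemma pvMget_coe {m : List Bool} {i : Nat} (hi : i < m.length) : pvMget m (i : Int) = m[i] := by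
  simp [pvMget, List.getD_eq_getElem?_getD, List.getElem?_eq_getElem hi]

lemma getD_false_coe {m : List Bool} {i : Nat} (hi : i < m.length) : m.getD i false = m[i] := by
  simp [List.getD_eq_getElem?_getD, List.getElem?_eq_getElem hi]

lemma pvMget_true_getD {m : List Bool} {c : Int} (h0 : 0 ≤ c) (hlt : c.toNat < m.length)
    (h : pvMget m c = true) : m.getD c.toNat false = true := by
  rw [pvMget, if_pos h0] at h
  rw [List.getD_eq_getElem?_getD, List.getElem?_eq_getElem hlt] at h ⊢
  simpa using h

-- ----- reachability facts -----
lemma pvGen_range {rev : List (List Int)} {finals : List Int} {n : Int}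
    (hfin : ∀ f ∈ finals, 0 ≤ f ∧ f < n)
    (hrow : ∀ row ∈ rev.take n.toNat, ∀ s ∈ row, 0 ≤ s ∧ s < n) :
    ∀ {s : Int}, pvGen rev finals s → 0 ≤ s ∧ s < n := by
  intro s h
  induction h with
  | final hs => exact hfin _ hs
  | @step c s hc hs ih =>
    unfold pvRow at hs
    split at hs
    · by_cases hlt : c.toNat < rev.length
      · rw [List.getD_eq_getElem?_getD, List.getElem?_eq_getElem hlt] at hs
        have htk : c.toNat < (rev.take n.toNat).length := by
          simp [List.length_take]; omega
        have hmem : rev[c.toNat] ∈ rev.take n.toNat := by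
          have := List.getElem_mem htk
          rwa [List.getElem_take] at this
        exact hrow _ hmem _ hs
      · rw [List.getD_eq_getElem?_getD, List.getElem?_eq_none (by omega)] at hs
        simp at hs
    · simp at hs

lemma pvMget_gen {rev : List (List Int)} {finals : List Int} {m : List Bool} {n : Int} {c : Int}
    (hlen : m.length = n.toNat) (h0 : 0 ≤ c) (hcn : c < n)
    (hsound : ∀ i : Nat, m.getD i false = true → pvGen rev finals (i : Int))
    (h : pvMget m c = true) : pvGen rev finals c := by
  have hlt : c.toNat < m.length := by omega
  have := hsound c.toNat (pvMget_true_getD h0 hlt h)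
  rwa [Int.toNat_of_nonneg h0] at this

-- closedness of a mask at one state
def pvClosedAt (rev : List (List Int)) (m : List Bool) (c : Int) : Prop :=
  ∀ s ∈ pvRow rev c, pvMget m s = true

-- if a mask is closed, marks the finals and is long enough, it marks every generating state
lemma pvComplete {rev : List (List Int)} {finals : List Int} {n : Int} {m : List Bool}
    (hfin : ∀ f ∈ finals, 0 ≤ f ∧ f < n)
    (hrow : ∀ row ∈ rev.take n.toNat, ∀ s ∈ row, 0 ≤ s ∧ s < n)
    (hF : ∀ f ∈ finals, pvMget m f = true)
    (hC : ∀ c : Int, 0 ≤ c → c < n → pvMget m c = true → pvClosedAt rev m c) :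
    ∀ {s : Int}, pvGen rev finals s → pvMget m s = true := by
  intro s h
  induction h with
  | final hs => exact hF _ hs
  | @step c s hc hs ih =>
    obtain ⟨h0, hcn⟩ := pvGen_range hfin hrow hc
    exact hC c h0 hcn ih s hs

-- ----- A side: BFS invariant -----
lemma pvFoldA_inv {rev : List (List Int)} {finals : List Int} {n : Int} {c : Int}
    (hc : pvGen rev finals c) :
    ∀ (row q : List Int) (mask : List Bool),
    (∀ s ∈ row, s ∈ pvRow rev c) →
    mask.length = n.toNat →
    (∀ i : Nat, mask.getD i false = true → pvGen rev finals (i : Int)) →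
    (∀ e ∈ q, pvGen rev finals e) →
    (∀ i : Nat, mask.getD i false = true →
        ((i : Int) ∈ q ∨ pvClosedAt rev mask (i : Int) ∨ (i : Int) = c)) →
    (row.foldl pvStepA (q, mask)).2.length = n.toNat ∧
    (∀ i : Nat, (row.foldl pvStepA (q, mask)).2.getD i false = true → pvGen rev finals (i : Int)) ∧
    (∀ e ∈ (row.foldl pvStepA (q, mask)).1, pvGen rev finals e) ∧
    (∀ i : Nat, (row.foldl pvStepA (q, mask)).2.getD i false = true →
        ((i : Int) ∈ (row.foldl pvStepA (q, mask)).1 ∨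
         pvClosedAt rev (row.foldl pvStepA (q, mask)).2 (i : Int) ∨ (i : Int) = c)) ∧
    (∀ j : Int, pvMget mask j = true → pvMget (row.foldl pvStepA (q, mask)).2 j = true) ∧
    (∀ s ∈ row, pvMget (row.foldl pvStepA (q, mask)).2 s = true) := by
  intro row
  induction row with
  | nil =>
    intro q mask _ h1 h2 h3 h4
    exact ⟨h1, h2, h3, fun i hi => (h4 i hi).imp id (Or.imp id id), fun j h => h, by simp⟩
  | cons s row ih =>
    intro q mask hrowc h1 h2 h3 h4
    simp only [List.foldl_cons]
    have hsc : s ∈ pvRow rev c := hrowc s (by simp)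
    by_cases h : pvMget mask s = false
    · have hst : pvStepA (q, mask) s = (q ++ [s], pvMset mask s) := by simp [pvStepA, h]
      rw [hst]
      have hgs : pvGen rev finals s := pvGen.step hc hsc
      have h1' : (pvMset mask s).length = n.toNat := by
        unfold pvMset; split <;> simp [h1]
      have h2' : ∀ i : Nat, (pvMset mask s).getD i false = true → pvGen rev finals (i : Int) := by
        intro i hi
        rcases getD_pvMset_src hi with hold | hnew
        · exact h2 i hold
        · rwa [hnew] at hgs
      have h3' : ∀ e ∈ q ++ [s], pvGen rev finals e := by
        intro e he
        rcases List.mem_append.1 he with he | he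
        · exact h3 e he
        · simp at he; rwa [he]
      have h4' : ∀ i : Nat, (pvMset mask s).getD i false = true →
          ((i : Int) ∈ q ++ [s] ∨ pvClosedAt rev (pvMset mask s) (i : Int) ∨ (i : Int) = c) := by
        intro i hi
        rcases getD_pvMset_src hi with hold | hnew
        · rcases h4 i hold with hq | hcl | hic
          · exact Or.inl (List.mem_append.2 (Or.inl hq))
          · exact Or.inr (Or.inl (fun t ht => pvMget_mset_mono s (hcl t ht)))
          · exact Or.inr (Or.inr hic)
        · exact Or.inl (List.mem_append.2 (Or.inr (by simp [hnew])))
      obtain ⟨g1, g2, g3, g4, g5, g6⟩ :=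
        ih (q ++ [s]) (pvMset mask s) (fun t ht => hrowc t (by simp [ht])) h1' h2' h3' h4'
      refine ⟨g1, g2, g3, g4, ?_, ?_⟩
      · intro j hj
        exact g5 j (pvMget_mset_mono s hj)
      · intro t ht
        rcases List.mem_cons.1 ht with ht | ht
        · subst ht; exact g5 t (pvMget_mset_self mask t)
        · exact g6 t ht
    · have hst : pvStepA (q, mask) s = (q, mask) := by simp [pvStepA, h]
      rw [hst]
      obtain ⟨g1, g2, g3, g4, g5, g6⟩ :=
        ih q mask (fun t ht => hrowc t (by simp [ht])) h1 h2 h3 h4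
      refine ⟨g1, g2, g3, g4, g5, ?_⟩
      intro t ht
      rcases List.mem_cons.1 ht with ht | ht
      · subst ht; exact g5 t (by simpa using h)
      · exact g6 t ht

lemma pvBfsA_inv {rev : List (List Int)} {finals : List Int} {n : Int} :
    ∀ (q : List Int) (mask : List Bool),
    mask.length = n.toNat →
    (∀ i : Nat, mask.getD i false = true → pvGen rev finals (i : Int)) →
    (∀ e ∈ q, pvGen rev finals e) →
    (∀ i : Nat, mask.getD i false = true →
        ((i : Int) ∈ q ∨ pvClosedAt rev mask (i : Int))) →
    (pvBfsA rev q mask).length = n.toNat ∧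
    (∀ i : Nat, (pvBfsA rev q mask).getD i false = true → pvGen rev finals (i : Int)) ∧
    (∀ i : Nat, (pvBfsA rev q mask).getD i false = true →
        pvClosedAt rev (pvBfsA rev q mask) (i : Int)) ∧
    (∀ j : Int, pvMget mask j = true → pvMget (pvBfsA rev q mask) j = true) := by
  intro q mask
  induction q, mask using pvBfsA.induct rev with
  | case1 mask =>
    intro h1 h2 _ h4
    rw [pvBfsA]
    refine ⟨h1, h2, ?_, fun j h => h⟩
    intro i hi
    rcases h4 i hi with hq | hcl
    · simp at hq
    · exact hcl
  | case2 c q mask p ih =>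
    intro h1 h2 h3 h4
    have hc : pvGen rev finals c := h3 c (by simp)
    have h4' : ∀ i : Nat, mask.getD i false = true →
        ((i : Int) ∈ q ∨ pvClosedAt rev mask (i : Int) ∨ (i : Int) = c) := by
      intro i hi
      rcases h4 i hi with hq | hcl
      · rcases List.mem_cons.1 hq with hq | hq
        · exact Or.inr (Or.inr hq)
        · exact Or.inl hq
      · exact Or.inr (Or.inl hcl)
    obtain ⟨g1, g2, g3, g4, g5, g6⟩ :=
      pvFoldA_inv hc (pvRow rev c) q mask (fun t ht => ht) h1 h2
        (fun e he => h3 e (by simp [he])) h4'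
    have h4'' : ∀ i : Nat,
        ((pvRow rev c).foldl pvStepA (q, mask)).2.getD i false = true →
        ((i : Int) ∈ ((pvRow rev c).foldl pvStepA (q, mask)).1 ∨
         pvClosedAt rev ((pvRow rev c).foldl pvStepA (q, mask)).2 (i : Int)) := by
      intro i hi
      rcases g4 i hi with hq | hcl | hic
      · exact Or.inl hq
      · exact Or.inr hcl
      · exact Or.inr (by rw [hic]; exact g6)
    obtain ⟨k1, k2, k3, k4⟩ := ih g1 g2 g3 h4''
    rw [pvBfsA]
    exact ⟨k1, k2, k3, fun j hj => k4 j (g5 j hj)⟩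

-- ----- B side: sweep invariant -----
lemma pvFoldB_inv {rev : List (List Int)} {finals : List Int} {n : Int} {c : Int}
    (hc : pvGen rev finals c) :
    ∀ (row : List Int) (acc : List Bool × Bool),
    (∀ s ∈ row, s ∈ pvRow rev c) →
    acc.1.length = n.toNat →
    (∀ i : Nat, acc.1.getD i false = true → pvGen rev finals (i : Int)) →
    (row.foldl pvStepB acc).1.length = n.toNat ∧
    (∀ i : Nat, (row.foldl pvStepB acc).1.getD i false = true → pvGen rev finals (i : Int)) ∧
    (∀ j : Int, pvMget acc.1 j = true → pvMget (row.foldl pvStepB acc).1 j = true) := by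
  intro row
  induction row with
  | nil => intro acc _ h1 h2; exact ⟨h1, h2, fun j h => h⟩
  | cons s row ih =>
    intro acc hrowc h1 h2
    simp only [List.foldl_cons]
    have hsc : s ∈ pvRow rev c := hrowc s (by simp)
    by_cases h : pvMget acc.1 s = false
    · have hst : pvStepB acc s = (pvMset acc.1 s, true) := by simp [pvStepB, h]
      rw [hst]
      have hgs : pvGen rev finals s := pvGen.step hc hsc
      have h1' : (pvMset acc.1 s).length = n.toNat := by
        unfold pvMset; split <;> simp [h1]
      have h2' : ∀ i : Nat, (pvMset acc.1 s).getD i false = true → pvGen rev finals (i : Int) := by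
        intro i hi
        rcases getD_pvMset_src hi with hold | hnew
        · exact h2 i hold
        · rwa [hnew] at hgs
      obtain ⟨g1, g2, g3⟩ :=
        ih (pvMset acc.1 s, true) (fun t ht => hrowc t (by simp [ht])) h1' h2'
      exact ⟨g1, g2, fun j hj => g3 j (pvMget_mset_mono s hj)⟩
    · have hst : pvStepB acc s = acc := by simp [pvStepB, h]
      rw [hst]
      exact ih acc (fun t ht => hrowc t (by simp [ht])) h1 h2

lemma pvFoldOut_inv {rev : List (List Int)} {finals : List Int} {n : Int} :
    ∀ (l : List Int) (acc : List Bool × Bool),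
    (∀ cur ∈ l, 0 ≤ cur ∧ cur < n) →
    acc.1.length = n.toNat →
    (∀ i : Nat, acc.1.getD i false = true → pvGen rev finals (i : Int)) →
    (l.foldl (pvStepOut rev) acc).1.length = n.toNat ∧
    (∀ i : Nat, (l.foldl (pvStepOut rev) acc).1.getD i false = true → pvGen rev finals (i : Int)) ∧
    (∀ j : Int, pvMget acc.1 j = true → pvMget (l.foldl (pvStepOut rev) acc).1 j = true) := by
  intro l
  induction l with
  | nil => intro acc _ h1 h2; exact ⟨h1, h2, fun j h => h⟩
  | cons c l ih =>
    intro acc hl h1 h2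
    simp only [List.foldl_cons]
    by_cases h : pvMget acc.1 c = true
    · have hst : pvStepOut rev acc c = (pvRow rev c).foldl pvStepB acc := by
        simp [pvStepOut, h]
      rw [hst]
      have hc : pvGen rev finals c :=
        pvMget_gen h1 (hl c (by simp)).1 (hl c (by simp)).2 h2 h
      obtain ⟨g1, g2, g3⟩ := pvFoldB_inv hc (pvRow rev c) acc (fun t ht => ht) h1 h2
      obtain ⟨k1, k2, k3⟩ := ih _ (fun t ht => hl t (by simp [ht])) g1 g2
      exact ⟨k1, k2, fun j hj => k3 j (g3 j hj)⟩
    · have hst : pvStepOut rev acc c = acc := by simp [pvStepOut, h]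
      rw [hst]
      exact ih acc (fun t ht => hl t (by simp [ht])) h1 h2

-- ----- B side: a sweep that reports no change leaves the mask unchanged and certifies closedness -----
lemma pvFoldB_flag : ∀ (row : List Int) (acc : List Bool × Bool), acc.2 = true →
    (row.foldl pvStepB acc).2 = true := by
  intro row
  induction row with
  | nil => intro acc h; exact h
  | cons s row ih =>
    intro acc h
    simp only [List.foldl_cons]
    by_cases hs : pvMget acc.1 s = false
    · have hst : pvStepB acc s = (pvMset acc.1 s, true) := by simp [pvStepB, hs]
      rw [hst]; exact ih _ rfl
    · have hst : pvStepB acc s = acc := by simp [pvStepB, hs]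
      rw [hst]; exact ih acc h

lemma pvFoldOut_flag {rev : List (List Int)} : ∀ (l : List Int) (acc : List Bool × Bool),
    acc.2 = true → (l.foldl (pvStepOut rev) acc).2 = true := by
  intro l
  induction l with
  | nil => intro acc h; exact h
  | cons c l ih =>
    intro acc h
    simp only [List.foldl_cons]
    by_cases hc : pvMget acc.1 c = true
    · have hst : pvStepOut rev acc c = (pvRow rev c).foldl pvStepB acc := by
        simp [pvStepOut, hc]
      rw [hst]
      exact ih _ (pvFoldB_flag _ acc h)
    · have hst : pvStepOut rev acc c = acc := by simp [pvStepOut, hc]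
      rw [hst]; exact ih acc h

lemma pvFoldB_fix : ∀ (row : List Int) (mask : List Bool),
    (row.foldl pvStepB (mask, false)).2 = false →
    (row.foldl pvStepB (mask, false)).1 = mask ∧ ∀ s ∈ row, pvMget mask s = true := by
  intro row
  induction row with
  | nil => intro mask _; exact ⟨rfl, by simp⟩
  | cons s row ih =>
    intro mask h
    simp only [List.foldl_cons] at h ⊢
    by_cases hs : pvMget mask s = false
    · have hst : pvStepB (mask, false) s = (pvMset mask s, true) := by simp [pvStepB, hs]
      rw [hst] at h
      rw [pvFoldB_flag row _ rfl] at h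
      simp at h
    · have hst : pvStepB (mask, false) s = (mask, false) := by simp [pvStepB, hs]
      rw [hst] at h ⊢
      obtain ⟨g1, g2⟩ := ih mask h
      refine ⟨g1, ?_⟩
      intro t ht
      rcases List.mem_cons.1 ht with ht | ht
      · subst ht; simpa using hs
      · exact g2 t ht

lemma pvFoldOut_fix {rev : List (List Int)} : ∀ (l : List Int) (mask : List Bool),
    (l.foldl (pvStepOut rev) (mask, false)).2 = false →
    (l.foldl (pvStepOut rev) (mask, false)).1 = mask ∧
    ∀ c ∈ l, pvMget mask c = true → pvClosedAt rev mask c := by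
  intro l
  induction l with
  | nil => intro mask _; exact ⟨rfl, by simp⟩
  | cons c l ih =>
    intro mask h
    simp only [List.foldl_cons] at h ⊢
    by_cases hc : pvMget mask c = true
    · have hst : pvStepOut rev (mask, false) c = (pvRow rev c).foldl pvStepB (mask, false) := by
        simp [pvStepOut, hc]
      rw [hst] at h ⊢
      by_cases hflag : ((pvRow rev c).foldl pvStepB (mask, false)).2 = true
      · rw [pvFoldOut_flag l _ hflag] at h; simp at h
      · have hflag' : ((pvRow rev c).foldl pvStepB (mask, false)).2 = false := by
          simpa using hflag
        obtain ⟨f1, f2⟩ := pvFoldB_fix (pvRow rev c) mask hflag'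
        have hpair : (pvRow rev c).foldl pvStepB (mask, false) = (mask, false) := by
          exact Prod.ext f1 hflag'
        rw [hpair] at h ⊢
        obtain ⟨g1, g2⟩ := ih mask h
        refine ⟨g1, ?_⟩
        intro t ht hmt
        rcases List.mem_cons.1 ht with ht | ht
        · subst ht; exact f2
        · exact g2 t ht hmt
    · have hst : pvStepOut rev (mask, false) c = (mask, false) := by simp [pvStepOut, hc]
      rw [hst] at h ⊢
      obtain ⟨g1, g2⟩ := ih mask h
      refine ⟨g1, ?_⟩
      intro t ht hmt
      rcases List.mem_cons.1 ht with ht | ht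
      · subst ht; exact absurd hmt hc
      · exact g2 t ht hmt

lemma pvLoopB_eq (rev : List (List Int)) (n : Int) (mask : List Bool) :
    pvLoopB rev n mask = if (pvSweep rev n mask).2 = true
      then pvLoopB rev n (pvSweep rev n mask).1 else (pvSweep rev n mask).1 := by
  rw [pvLoopB]
  by_cases h : (pvSweep rev n mask).2 = true
  · rw [dif_pos h, if_pos h]
  · rw [dif_neg h, if_neg h]

lemma pvLoopB_spec {rev : List (List Int)} {finals : List Int} {n : Int} :
    ∀ (mask : List Bool),
    mask.length = n.toNat →
    (∀ i : Nat, mask.getD i false = true → pvGen rev finals (i : Int)) →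
    (∀ f ∈ finals, pvMget mask f = true) →
    (pvLoopB rev n mask).length = n.toNat ∧
    (∀ i : Nat, (pvLoopB rev n mask).getD i false = true → pvGen rev finals (i : Int)) ∧
    (∀ f ∈ finals, pvMget (pvLoopB rev n mask) f = true) ∧
    (∀ c : Int, 0 ≤ c → c < n → pvMget (pvLoopB rev n mask) c = true →
      pvClosedAt rev (pvLoopB rev n mask) c) := by
  intro mask
  induction mask using pvLoopB.induct rev n with
  | case1 mask p hflag ih =>
    intro h1 h2 h3
    rw [pvLoopB_eq, if_pos hflag]
    have hrange : ∀ cur ∈ PySem.List.pyRange 0 n 1, 0 ≤ cur ∧ cur < n := by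
      intro cur hcur
      have := (PySem.List.mem_pyRange_one).1 hcur
      omega
    obtain ⟨g1, g2, g3⟩ := pvFoldOut_inv (finals := finals)
      (PySem.List.pyRange 0 n 1) (mask, false) hrange h1 h2
    exact ih g1 g2 (fun f hf => g3 f (h3 f hf))
  | case2 mask p hflag =>
    intro h1 h2 h3
    rw [pvLoopB_eq, if_neg hflag]
    have hflag' : (pvSweep rev n mask).2 = false := by simpa using hflag
    obtain ⟨f1, f2⟩ := pvFoldOut_fix (PySem.List.pyRange 0 n 1) mask hflag'
    have f1' : (pvSweep rev n mask).1 = mask := f1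
    rw [f1']
    refine ⟨h1, h2, h3, ?_⟩
    intro c hc0 hcn hm
    exact f2 c (PySem.List.mem_pyRange_one.2 (by omega)) hm

-- ----- initialisation -----
lemma pvInitA_pair : ∀ (finals q0 : List Int) (m0 : List Bool),
    finals.foldl (fun (acc : List Int × List Bool) f => (acc.1 ++ [f], pvMset acc.2 f)) (q0, m0)
      = (q0 ++ finals, finals.foldl (fun m f => pvMset m f) m0) := by
  intro finals
  induction finals with
  | nil => intro q0 m0; simp
  | cons f finals ih =>
    intro q0 m0
    simp only [List.foldl_cons]
    rw [ih]
    simp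

lemma pvFoldMset_len : ∀ (l : List Int) (m : List Bool),
    (l.foldl (fun m f => pvMset m f) m).length = m.length := by
  intro l
  induction l with
  | nil => intro m; rfl
  | cons f l ih =>
    intro m
    simp only [List.foldl_cons]
    rw [ih]
    unfold pvMset; split <;> simp

lemma pvFoldMset_mono : ∀ (l : List Int) (m : List Bool) (j : Int),
    pvMget m j = true → pvMget (l.foldl (fun m f => pvMset m f) m) j = true := by
  intro l
  induction l with
  | nil => intro m j h; exact h
  | cons f l ih =>
    intro m j h
    simp only [List.foldl_cons]
    exact ih _ j (pvMget_mset_mono f h)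

lemma pvFoldMset_fin : ∀ (l : List Int) (m : List Bool) (f : Int), f ∈ l →
    pvMget (l.foldl (fun m f => pvMset m f) m) f = true := by
  intro l
  induction l with
  | nil => intro m f h; simp at h
  | cons g l ih =>
    intro m f h
    simp only [List.foldl_cons]
    rcases List.mem_cons.1 h with h | h
    · subst h; exact pvFoldMset_mono l _ f (pvMget_mset_self m f)
    · exact ih _ f h

lemma pvFoldMset_src : ∀ (l : List Int) (m : List Bool) (i : Nat),
    (l.foldl (fun m f => pvMset m f) m).getD i false = true →
    m.getD i false = true ∨ (i : Int) ∈ l := by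
  intro l
  induction l with
  | nil => intro m i h; exact Or.inl h
  | cons f l ih =>
    intro m i h
    simp only [List.foldl_cons] at h
    rcases ih _ i h with hold | hmem
    · rcases getD_pvMset_src hold with h1 | h2
      · exact Or.inl h1
      · exact Or.inr (by rw [← h2]; simp)
    · exact Or.inr (by simp [hmem])

lemma getD_replicate_false (k i : Nat) : (List.replicate k false).getD i false = false := by
  rw [List.getD_eq_getElem?_getD, List.getElem?_replicate]
  split <;> rfl

lemma pvGen_nil {rev : List (List Int)} {s : Int} : ¬ pvGen rev [] s := by
  intro h
  induction h with
  | final hs => simp at hs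
  | step _ _ ih => exact ih

-- ===== VERDICT (by name: the statement is the Claim_ definition above) =====
theorem find_word_generating_states_spec : Claim_equal_find_word_generating_states := by
  intro rev finals n _hDom hPre
  simp only [Spec_find_word_generating_states, find_word_generating_states,
    find_word_generating_states_alt, pvInitA_pair, List.nil_append]
  set m1 := finals.foldl (fun m f => pvMset m f) (List.replicate n.toNat false) with hm1
  have len1 : m1.length = n.toNat := by rw [hm1, pvFoldMset_len]; simp
  have sound1 : ∀ i : Nat, m1.getD i false = true → pvGen rev finals (i : Int) := by
    intro i hi
    rcases pvFoldMset_src finals _ i hi with h | h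
    · rw [getD_replicate_false] at h; simp at h
    · exact pvGen.final h
  have fin1 : ∀ f ∈ finals, pvMget m1 f = true := fun f hf => pvFoldMset_fin finals _ f hf
  have qgen : ∀ e ∈ finals, pvGen rev finals e := fun e he => pvGen.final he
  have pend1 : ∀ i : Nat, m1.getD i false = true →
      ((i : Int) ∈ finals ∨ pvClosedAt rev m1 (i : Int)) := by
    intro i hi
    rcases pvFoldMset_src finals _ i hi with h | h
    · rw [getD_replicate_false] at h; simp at h
    · exact Or.inl h
  obtain ⟨a1, a2, a3, a4⟩ := pvBfsA_inv (n := n) finals m1 len1 sound1 qgen pend1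
  obtain ⟨b1, b2, b3, b4⟩ := pvLoopB_spec (n := n) m1 len1 sound1 fin1
  apply List.ext_getElem (by rw [a1, b1])
  intro i hi1 hi2
  rcases hPre with hnil | ⟨hn0, hlen, hfin, hrow⟩
  · subst hnil
    have e1 : (pvBfsA rev [] m1)[i] = false := by
      by_contra hb
      have hb' : (pvBfsA rev [] m1)[i] = true := by
        revert hb; cases (pvBfsA rev [] m1)[i] <;> simp
      exact pvGen_nil (a2 i (by rw [getD_false_coe hi1]; exact hb'))
    have e2 : (pvLoopB rev n m1)[i] = false := by
      by_contra hb
      have hb' : (pvLoopB rev n m1)[i] = true := by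
        revert hb; cases (pvLoopB rev n m1)[i] <;> simp
      exact pvGen_nil (b2 i (by rw [getD_false_coe hi2]; exact hb'))
    rw [e1, e2]
  · have aC : ∀ c : Int, 0 ≤ c → c < n → pvMget (pvBfsA rev finals m1) c = true →
        pvClosedAt rev (pvBfsA rev finals m1) c := by
      intro c hc0 hcn hm
      have hlt : c.toNat < (pvBfsA rev finals m1).length := by rw [a1]; omega
      have := a3 c.toNat (pvMget_true_getD hc0 hlt hm)
      rwa [Int.toNat_of_nonneg hc0] at this
    have compA : ∀ {s : Int}, pvGen rev finals s → pvMget (pvBfsA rev finals m1) s = true :=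
      fun {s} h => pvComplete hfin hrow (fun f hf => a4 f (fin1 f hf)) aC h
    have compB : ∀ {s : Int}, pvGen rev finals s → pvMget (pvLoopB rev n m1) s = true :=
      fun {s} h => pvComplete hfin hrow b3 b4 h
    by_cases hg : pvGen rev finals (i : Int)
    · have e1 := compA hg
      have e2 := compB hg
      rw [pvMget_coe hi1] at e1
      rw [pvMget_coe hi2] at e2
      rw [e1, e2]
    · have e1 : (pvBfsA rev finals m1)[i] = false := by
        by_contra hb
        have hb' : (pvBfsA rev finals m1)[i] = true := by
          revert hb; cases (pvBfsA rev finals m1)[i] <;> simp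
        exact hg (a2 i (by rw [getD_false_coe hi1]; exact hb'))
      have e2 : (pvLoopB rev n m1)[i] = false := by
        by_contra hb
        have hb' : (pvLoopB rev n m1)[i] = true := by
          revert hb; cases (pvLoopB rev n m1)[i] <;> simp
        exact hg (b2 i (by rw [getD_false_coe hi2]; exact hb'))
      rw [e1, e2]
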